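-- pv_equiv track=rewrite | github.com/aminuolawale/algo_prep | trials/sorted_sums.py | sortedSum
-- ===== SOURCE A (Python) =====
-- def sortedSum(a):
--     sorted_a = sorted(a)
--     sum = 0
--     index = len(sorted_a)
--     while index > 0:
--         sum += f(sorted_a)
--         sorted_a.remove(a[index - 1])
--         index -= 1
--     return sum % (10 ** 9 + 7)
--
-- def f(a):
--     return sum([(i + 1) * s for i, s in enumerate(a)])
-- ===== SOURCE B (Python) =====
-- def sortedSum(a):
--     # Closed form: element a[j] appears in the sorted prefixes of lengths j+1..n,
--     # contributing its value once per prefix plus, for each earlier i, max(a[i], a[j])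
--     # per prefix containing both.  No sorting, no list mutation.
--     n = len(a)
--     total = 0
--     for j in range(n):
--         contrib = a[j]
--         for i in range(j):
--             contrib += a[i] if a[i] > a[j] else a[j]
--         total += (n - j) * contrib
--     return total % (10 ** 9 + 7)
-- ===== Notes on version B (the rewrite author's own statement) =====
-- stated objective: alternative
-- what changed: Replaced A's sort-then-repeatedly-remove loop (re-evaluating the weighted rank sum f on each shrinking sorted list) by a closed-form pair-counting double sum with no sorting and no list mutation: each a[j] contributes (n-j)*(a[j] + sum over i<j of max(a[i],a[j])).
import Mathlib
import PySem

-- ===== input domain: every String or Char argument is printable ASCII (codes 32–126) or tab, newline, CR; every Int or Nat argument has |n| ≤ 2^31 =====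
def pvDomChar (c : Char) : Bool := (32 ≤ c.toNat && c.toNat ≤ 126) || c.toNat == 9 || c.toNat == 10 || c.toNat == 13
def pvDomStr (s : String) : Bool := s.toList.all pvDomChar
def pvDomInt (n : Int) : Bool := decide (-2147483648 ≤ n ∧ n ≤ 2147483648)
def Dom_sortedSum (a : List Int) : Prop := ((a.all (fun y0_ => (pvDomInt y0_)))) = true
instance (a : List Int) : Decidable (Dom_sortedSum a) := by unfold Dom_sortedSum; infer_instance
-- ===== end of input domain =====

-- B replaces A's sort-then-repeated-removal loop by a closed-form pair-counting double sum
-- (no sorting, no list mutation); same cost class, genuinely different algorithm.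

-- ===== PORT A =====
-- helper f: sum([(i + 1) * s for i, s in enumerate(a)])
def fPy (l : List Int) : Int :=
  ((PySem.List.enumerate l).map (fun p => (p.1 + 1) * p.2)).sum

-- the while-loop: fuel = index; a[index-1] is always in range and always present in
-- sorted_a, so the getD defaults below are never used (exactness noted here).
def sortedSumLoop (a : List Int) : Nat → List Int → Int → Int
  | 0, _, s => s
  | k + 1, sorted_a, s =>
      let s' := s + fPy sorted_a
      let v := PySem.List.pyGetD a ((k : Int)) 0
      let sorted_a' := (PySem.List.remove? sorted_a v).getD sorted_a
      sortedSumLoop a k sorted_a' s'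

def sortedSum (a : List Int) : Int :=
  let sorted_a := PySem.List.sorted a (fun x => x) false
  PySem.Int.mod (sortedSumLoop a a.length sorted_a 0) (10 ^ 9 + 7)

-- ===== PORT B =====
def sortedSum_alt (a : List Int) : Int :=
  let n : Int := a.length
  let total :=
    (PySem.List.pyRange 0 n 1).foldl (fun total j =>
      let aj := PySem.List.pyGetD a j 0
      let contrib :=
        (PySem.List.pyRange 0 j 1).foldl
          (fun c i =>
            let ai := PySem.List.pyGetD a i 0
            c + (if ai > aj then ai else aj)) aj
      total + (n - j) * contrib) 0
  PySem.Int.mod total (10 ^ 9 + 7)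

-- ===== PRECONDITION & SPEC =====
def Spec_sortedSum (a : List Int) (out : Int) : Prop := out = sortedSum_alt a
instance (a : List Int) (out : Int) : Decidable (Spec_sortedSum a out) := by unfold Spec_sortedSum; infer_instance

-- ===== CLAIM (what is proved, stated in full; the proofs are below) =====
def Claim_equal_sortedSum : Prop := ∀ (a : List Int), Dom_sortedSum a → Spec_sortedSum a (sortedSum a)

-- ===== LEMMAS AND PROOFS =====

-- pm l = sum over pairs i < j of max(l_i, l_j)
def pm : List Int → Int
  | [] => 0
  | x :: xs => (xs.map (fun y => max x y)).sum + pm xs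

theorem pm_perm {l1 l2 : List Int} (h : l1.Perm l2) : pm l1 = pm l2 := by
  induction h with
  | nil => rfl
  | cons x _ ih => simp [pm, ih, List.Perm.sum_eq (List.Perm.map _ (by assumption))]
  | swap x y l =>
      simp only [pm, List.map_cons, List.sum_cons]
      rw [max_comm]; ring
  | trans _ _ ih1 ih2 => exact ih1.trans ih2

-- on a sorted list, fPy l = l.sum + pm l
theorem fPy_enum_shift (l : List Int) (s : Int) :
    ((PySem.List.enumerate l (s + 1)).map (fun p => (p.1 + 1) * p.2)).sum
      = ((PySem.List.enumerate l s).map (fun p => (p.1 + 1) * p.2)).sum + l.sum := by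
  induction l generalizing s with
  | nil => simp [PySem.List.enumerate_nil]
  | cons x xs ih => simp [PySem.List.enumerate_cons, ih]; ring

theorem fPy_cons (x : Int) (xs : List Int) : fPy (x :: xs) = x + xs.sum + fPy xs := by
  unfold fPy
  rw [PySem.List.enumerate_cons]
  simp only [List.map_cons, List.sum_cons]
  rw [show (0:Int) + 1 = 0 + 1 from rfl, fPy_enum_shift xs 0]
  ring

theorem fPy_sorted_eq (l : List Int) (h : l.Pairwise (· ≤ ·)) : fPy l = l.sum + pm l := by
  induction l with
  | nil => simp [fPy, pm, PySem.List.enumerate_nil]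
  | cons x xs ih =>
    have hx : ∀ y ∈ xs, x ≤ y := fun y hy => (List.pairwise_cons.mp h).1 y hy
    have hmax : (xs.map (fun y => max x y)) = xs := by
      apply List.map_congr_left ?_ |>.trans (List.map_id _)
      intro y hy; exact max_eq_right (hx y hy)
    rw [fPy_cons, ih (List.pairwise_cons.mp h).2]
    simp [pm, hmax]

theorem fPy_sorted (l : List Int) :
    fPy (PySem.List.sorted l (fun x => x) false) = l.sum + pm l := by
  have hperm := PySem.List.sorted_perm l (fun x => x) false
  have hp : (PySem.List.sorted l (fun x => x) false).Pairwise (· ≤ ·) := by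
    simpa using PySem.List.sorted_pairwise l (fun x => x)
  rw [fPy_sorted_eq _ hp, hperm.sum_eq, pm_perm hperm]

-- removing a[k] from sorted(take (k+1) a) yields sorted(take k a)
theorem erase_sorted_append (l : List Int) (v : Int) :
    (PySem.List.sorted (l ++ [v]) (fun x => x) false).erase v
      = PySem.List.sorted l (fun x => x) false := by
  have hperm := PySem.List.sorted_perm (l ++ [v]) (fun x => x) false
  have hperm2 : ((PySem.List.sorted (l ++ [v]) (fun x => x) false).erase v).Perm l := by
    refine (hperm.erase v).trans ?_
    have : (l ++ [v]).Perm (v :: l) := by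
      exact List.perm_append_comm
    exact (this.erase v).trans (by simp)
  have hs1 : ((PySem.List.sorted (l ++ [v]) (fun x => x) false).erase v).Pairwise (· ≤ ·) := by
    refine List.Pairwise.sublist (List.erase_sublist ..) ?_
    simpa using PySem.List.sorted_pairwise (l ++ [v]) (fun x => x)
  have hs2 : (PySem.List.sorted l (fun x => x) false).Pairwise (· ≤ ·) := by
    simpa using PySem.List.sorted_pairwise l (fun x => x)
  exact List.Perm.eq_of_pairwise (fun a b _ _ h1 h2 => le_antisymm h1 h2) hs1 hs2
    (hperm2.trans (PySem.List.sorted_perm l (fun x => x) false).symm)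

theorem take_succ_eq (a : List Int) (k : Nat) (hk : k < a.length) :
    a.take (k + 1) = a.take k ++ [a[k]] := by
  rw [List.take_succ]
  simp [List.getElem?_eq_getElem hk]

-- A's loop computes the prefix sum of fPy over sorted prefixes
def Asum (a : List Int) : Int :=
  ((List.range a.length).map (fun m => (a.take (m + 1)).sum + pm (a.take (m + 1)))).sum

theorem loop_spec (a : List Int) (k : Nat) (s : Int) (hk : k ≤ a.length) :
    sortedSumLoop a k (PySem.List.sorted (a.take k) (fun x => x) false) s
      = s + ((List.range k).map (fun m => (a.take (m + 1)).sum + pm (a.take (m + 1)))).sum := by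
  induction k generalizing s with
  | zero => simp [sortedSumLoop]
  | succ k ih =>
    have hklt : k < a.length := hk
    have hv : PySem.List.pyGetD a ((k : Int)) 0 = a[k] := by
      simp [PySem.List.pyGetD_natCast, List.getD_eq_getElem?_getD, hklt]
    have htake := take_succ_eq a k hklt
    have hmem : a[k] ∈ PySem.List.sorted (a.take (k + 1)) (fun x => x) false := by
      rw [PySem.List.mem_sorted, htake]
      exact List.mem_append_right _ (List.mem_singleton_self _)
    have hrem : (PySem.List.remove? (PySem.List.sorted (a.take (k + 1)) (fun x => x) false) a[k]).getD
        (PySem.List.sorted (a.take (k + 1)) (fun x => x) false)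
        = PySem.List.sorted (a.take k) (fun x => x) false := by
      rw [PySem.List.remove?_eq_some_erase _ _ hmem]
      simp only [Option.getD_some]
      rw [htake, erase_sorted_append]
    rw [sortedSumLoop, hv, hrem, ih _ (le_of_lt hklt)]
    rw [fPy_sorted]
    simp [List.range_succ]
    ring

theorem sortedSum_eq_Asum (a : List Int) :
    sortedSum a = PySem.Int.mod (Asum a) (10 ^ 9 + 7) := by
  have := loop_spec a a.length 0 (le_refl _)
  simp only [List.take_length] at this
  simp [sortedSum, this, Asum]

-- B's closed form
def Bsum (a : List Int) : Int :=
  ((List.range a.length).map (fun j =>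
    ((a.length : Int) - j) *
      (a.getD j 0 + ((List.range j).map (fun i => max (a.getD i 0) (a.getD j 0))).sum))).sum

theorem sortedSum_alt_eq_Bsum (a : List Int) :
    sortedSum_alt a = PySem.Int.mod (Bsum a) (10 ^ 9 + 7) := by
  unfold sortedSum_alt Bsum
  simp only [PySem.List.pyRange_one, List.foldl_map, PySem.List.foldl_add, zero_add,
    PySem.List.pyGetD_natCast]
  congr 1
  congr 1
  apply List.map_congr_left
  intro j hj
  simp only [Int.sub_zero, Int.toNat_natCast]
  simp only [List.getD_eq_getElem?_getD, gt_iff_lt, mul_eq_mul_left_iff, add_right_inj]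
  left
  congr 1
  apply List.map_congr_left
  intro i _
  rw [max_def]; split_ifs <;> omega

-- the core identity
theorem pm_append_singleton (l : List Int) (x : Int) :
    pm (l ++ [x]) = pm l + (l.map (fun y => max y x)).sum := by
  induction l with
  | nil => simp [pm]
  | cons z zs ih => simp [pm, ih]; ring

theorem range_map_getD_eq_take (a : List Int) (j : Nat) (hj : j ≤ a.length) :
    (List.range j).map (fun i => a.getD i 0) = a.take j := by
  induction j with
  | zero => simp
  | succ j ih =>
    have hjl : j < a.length := hj
    rw [List.range_succ, List.map_append, ih (le_of_lt hjl), take_succ_eq a j hjl]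
    simp [List.getD_eq_getElem?_getD, hjl]

theorem getD_append_self (a : List Int) (x : Int) : (a ++ [x]).getD a.length 0 = x := by
  simp [List.getD_eq_getElem?_getD]


theorem col_last (a : List Int) (x : Int) :
    (List.range a.length).map (fun i => max ((a ++ [x]).getD i 0) ((a ++ [x]).getD a.length 0))
      = a.map (fun y => max y x) := by
  rw [getD_append_self]
  have h1 : (List.range a.length).map (fun i => max ((a ++ [x]).getD i 0) x)
      = (List.range a.length).map (fun i => max (a.getD i 0) x) := by
    apply List.map_congr_left
    intro i hi
    rw [List.getD_append _ _ _ _ (List.mem_range.mp hi)]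
  rw [h1, show (fun i => max (a.getD i 0) x) = ((fun y => max y x) ∘ (fun i => a.getD i 0)) from rfl,
    ← List.map_map, range_map_getD_eq_take a a.length (le_refl _), List.take_length]


theorem pm_eq_col_sum (a : List Int) :
    pm a = ((List.range a.length).map (fun j =>
      ((List.range j).map (fun i => max (a.getD i 0) (a.getD j 0))).sum)).sum := by
  induction a using List.reverseRecOn with
  | nil => simp [pm]
  | append_singleton a x ih =>
    rw [pm_append_singleton, ih]
    rw [List.length_append, List.length_singleton, List.range_succ, List.map_append,
      List.sum_append]
    congr 1
    · congr 1
      apply List.map_congr_left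
      intro j hj
      have hjl : j < a.length := List.mem_range.mp hj
      congr 1
      apply List.map_congr_left
      intro i hi
      have hil : i < a.length := lt_trans (List.mem_range.mp hi) hjl
      rw [List.getD_append _ _ _ _ hil, List.getD_append _ _ _ _ hjl]
    · simp only [List.map_cons, List.map_nil, List.sum_cons, List.sum_nil, add_zero]
      exact (congrArg List.sum (col_last a x)).symm

theorem sum_map_add_split (l : List Nat) (f g : Nat → Int) :
    (l.map (fun j => f j + g j)).sum = (l.map f).sum + (l.map g).sum := by
  induction l with
  | nil => simp
  | cons z zs ih => simp [ih]; ring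


theorem Asum_eq_Bsum (a : List Int) : Asum a = Bsum a := by
  induction a using List.reverseRecOn with
  | nil => simp [Asum, Bsum]
  | append_singleton a x ih =>
    have hlen : (a ++ [x]).length = a.length + 1 := by simp
    unfold Asum Bsum
    rw [hlen, List.range_succ, List.map_append, List.sum_append, List.map_append, List.sum_append]
    simp only [List.map_cons, List.map_nil, List.sum_cons, List.sum_nil, add_zero]
    -- A-side prefix terms
    have hA1 : (List.range a.length).map
        (fun m => ((a ++ [x]).take (m + 1)).sum + pm ((a ++ [x]).take (m + 1)))
        = (List.range a.length).map (fun m => (a.take (m + 1)).sum + pm (a.take (m + 1))) := by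
      apply List.map_congr_left
      intro m hm
      rw [List.take_append_of_le_length (List.mem_range.mp hm)]
    -- A-side last term
    have hA2 : (a ++ [x]).take (a.length + 1) = a ++ [x] := by
      rw [← hlen]; exact List.take_length
    -- B-side prefix terms
    have hB1 : (List.range a.length).map (fun j =>
        (((a.length + 1 : Nat) : Int) - j) *
          ((a ++ [x]).getD j 0 +
            ((List.range j).map (fun i => max ((a ++ [x]).getD i 0) ((a ++ [x]).getD j 0))).sum))
        = (List.range a.length).map (fun j =>
          ((a.length : Int) - j) *
            (a.getD j 0 + ((List.range j).map (fun i => max (a.getD i 0) (a.getD j 0))).sum)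
          + (a.getD j 0 + ((List.range j).map (fun i => max (a.getD i 0) (a.getD j 0))).sum)) := by
      apply List.map_congr_left
      intro j hj
      have hjl : j < a.length := List.mem_range.mp hj
      have hcol : (List.range j).map (fun i => max ((a ++ [x]).getD i 0) ((a ++ [x]).getD j 0))
          = (List.range j).map (fun i => max (a.getD i 0) (a.getD j 0)) := by
        apply List.map_congr_left
        intro i hi
        rw [List.getD_append _ _ _ _ (lt_trans (List.mem_range.mp hi) hjl),
          List.getD_append _ _ _ _ hjl]
      rw [hcol, List.getD_append _ _ _ _ hjl]
      push_cast
      ring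
    -- B-side column sums equal a.sum + pm a
    have hc : ((List.range a.length).map (fun j =>
        a.getD j 0 + ((List.range j).map (fun i => max (a.getD i 0) (a.getD j 0))).sum)).sum
        = a.sum + pm a := by
      rw [sum_map_add_split, range_map_getD_eq_take a a.length (le_refl _), List.take_length,
        ← pm_eq_col_sum]
    -- B-side last term
    have hB2 : (((a.length + 1 : Nat) : Int) - (a.length : Int)) *
        ((a ++ [x]).getD a.length 0 +
          ((List.range a.length).map
            (fun i => max ((a ++ [x]).getD i 0) ((a ++ [x]).getD a.length 0))).sum)
        = x + (a.map (fun y => max y x)).sum := by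
      rw [col_last, getD_append_self]
      push_cast
      ring
    have ih' : ((List.range a.length).map
        (fun m => (a.take (m + 1)).sum + pm (a.take (m + 1)))).sum
        = ((List.range a.length).map (fun j =>
          ((a.length : Int) - j) *
            (a.getD j 0 + ((List.range j).map (fun i => max (a.getD i 0) (a.getD j 0))).sum))).sum := ih
    rw [hA1, hA2, hB1,
      sum_map_add_split (List.range a.length)
        (fun j => ((a.length : Int) - j) *
          (a.getD j 0 + ((List.range j).map (fun i => max (a.getD i 0) (a.getD j 0))).sum))
        (fun j => a.getD j 0 + ((List.range j).map (fun i => max (a.getD i 0) (a.getD j 0))).sum),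
      hc, hB2, ih', pm_append_singleton, List.sum_append]
    simp only [List.sum_cons, List.sum_nil, add_zero]
    ring

-- ===== VERDICT (by name: the statement is the Claim_ definition above) =====
theorem sortedSum_spec : Claim_equal_sortedSum := by
  intro a _
  unfold Spec_sortedSum
  rw [sortedSum_eq_Asum, sortedSum_alt_eq_Bsum, Asum_eq_Bsum]
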